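-- pv_equiv track=rewrite | github.com/ecoffie/Bootcamp | auto-generate-hit-lists.py | filter_low_competition
-- ===== SOURCE A (Python) =====
-- def filter_low_competition(opportunities):
--     """Filter for low competition opportunities"""
--     low_comp = []
--
--     for opp in opportunities:
--         set_aside = str(opp.get('Set-Aside', '')).lower()
--
--         # Must have set-aside
--         if 'small business' in set_aside or '8(a)' in set_aside or '8a' in set_aside or 'wosb' in set_aside or 'sdvosb' in set_aside or 'hubzone' in set_aside:
--             low_comp.append(opp)
--
--     # Sort by response date (earliest first)
--     low_comp.sort(key=lambda x: x.get('Current Response Date', '9999-99-99'))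
--
--     return low_comp[:34]  # Top 34
-- ===== SOURCE B (Python) =====
-- def filter_low_competition(opportunities):
--     """Filter for low competition opportunities.
--
--     Single pass keeping a bounded, stably-ordered list of the 34
--     earliest-dated matches (insertion selection instead of full sort+slice).
--     """
--     keywords = ('small business', '8(a)', '8a', 'wosb', 'sdvosb', 'hubzone')
--     top = []  # at most 34 kept opportunities, ordered by response date, stable
--     for opp in opportunities:
--         set_aside = str(opp.get('Set-Aside', '')).lower()
--         if any(kw in set_aside for kw in keywords):
--             key = opp.get('Current Response Date', '9999-99-99')
--             i = 0
--             while i < len(top) and not key < top[i].get('Current Response Date', '9999-99-99'):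
--                 i += 1
--             top.insert(i, opp)
--             del top[34:]
--     return top
-- ===== Notes on version B (the rewrite author's own statement) =====
-- stated objective: alternative
-- what changed: Replaces filter-then-full-sort-then-slice with a single pass that stably inserts each matching opportunity into a bounded list truncated to 34, so no full sort of all matches is ever built.
import Mathlib
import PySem

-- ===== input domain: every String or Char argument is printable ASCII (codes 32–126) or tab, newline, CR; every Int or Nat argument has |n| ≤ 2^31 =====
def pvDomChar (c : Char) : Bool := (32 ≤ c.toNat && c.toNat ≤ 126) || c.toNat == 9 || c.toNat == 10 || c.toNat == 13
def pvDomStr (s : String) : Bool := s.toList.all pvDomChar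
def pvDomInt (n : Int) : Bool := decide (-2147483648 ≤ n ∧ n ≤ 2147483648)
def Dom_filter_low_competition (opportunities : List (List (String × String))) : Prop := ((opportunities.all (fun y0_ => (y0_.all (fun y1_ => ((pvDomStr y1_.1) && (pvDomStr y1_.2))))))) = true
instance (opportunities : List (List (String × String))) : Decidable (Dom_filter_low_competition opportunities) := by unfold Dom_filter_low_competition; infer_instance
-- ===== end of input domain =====

-- ===== PORT A =====
-- B differs from A: a single bounded stable-insertion pass replaces A's filter + full sort + slice; return values proved equal.
-- shared helpers (both Pythons use the same keyword test and sort key)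
def flcPred (opp : List (String × String)) : Bool :=
  let set_aside := PySem.Str.lower (PySem.Dict.getD (PySem.Dict.mk opp) "Set-Aside" "")
  PySem.Str.isIn "small business" set_aside || PySem.Str.isIn "8(a)" set_aside ||
    PySem.Str.isIn "8a" set_aside || PySem.Str.isIn "wosb" set_aside ||
    PySem.Str.isIn "sdvosb" set_aside || PySem.Str.isIn "hubzone" set_aside

def flcKey (opp : List (String × String)) : String :=
  PySem.Dict.getD (PySem.Dict.mk opp) "Current Response Date" "9999-99-99"

def filter_low_competition (opportunities : List (List (String × String))) : List (List (String × String)) :=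
  let low_comp := opportunities.foldl (fun acc opp => if flcPred opp then acc ++ [opp] else acc) []
  PySem.List.slice (PySem.List.sorted low_comp flcKey) none (some 34)

-- ===== PORT B =====
def filter_low_competition_alt (opportunities : List (List (String × String))) : List (List (String × String)) :=
  opportunities.foldl
    (fun top opp =>
      if flcPred opp then
        (PySem.List.insertBy (fun a b => decide (flcKey a < flcKey b)) opp top).take 34
      else top)
    []

-- ===== PRECONDITION & SPEC =====
def Spec_filter_low_competition (opportunities : List (List (String × String))) (out : List (List (String × String))) : Prop := out = filter_low_competition_alt opportunities
instance (opportunities : List (List (String × String))) (out : List (List (String × String))) : Decidable (Spec_filter_low_competition opportunities out) := by unfold Spec_filter_low_competition; infer_instance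

-- ===== CLAIM (what is proved, stated in full; the proofs are below) =====
def Claim_equal_filter_low_competition : Prop := ∀ (opportunities : List (List (String × String))), Dom_filter_low_competition opportunities → Spec_filter_low_competition opportunities (filter_low_competition opportunities)

-- ===== LEMMAS AND PROOFS =====
-- truncating to k commutes with stable insertion: inserting into the truncated list and
-- truncating again gives the first k of the full insertion
theorem take_insertBy {α : Type} (b : α → α → Bool) (x : α) :
    ∀ (ys : List α) (k : Nat),
      ((PySem.List.insertBy b x (ys.take k)).take k) = (PySem.List.insertBy b x ys).take k := by
  intro ys
  induction ys with
  | nil => intro k; simp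
  | cons y ys ih =>
    intro k
    cases k with
    | zero => simp
    | succ m =>
      simp only [List.take_succ_cons, PySem.List.insertBy]
      by_cases h : b x y = true
      · rw [if_pos h, if_pos h]
        cases m with
        | zero => simp
        | succ m' =>
          simp only [List.take_succ_cons, List.take_take, List.cons.injEq, true_and]
          rw [Nat.min_eq_left (Nat.le_succ m')]
      · rw [if_neg h, if_neg h, List.take_succ_cons, List.take_succ_cons, ih m]

-- the bounded-insertion fold computes the first k of the plain insertion fold
theorem foldl_insertBy_take {α : Type} (b : α → α → Bool) (k : Nat) :
    ∀ (l : List α) (acc : List α),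
      l.foldl (fun a x => (PySem.List.insertBy b x a).take k) (acc.take k) =
        (l.foldl (fun a x => PySem.List.insertBy b x a) acc).take k := by
  intro l
  induction l with
  | nil => intro acc; rfl
  | cons x l ih =>
    intro acc
    simp only [List.foldl_cons]
    rw [take_insertBy]
    exact ih _

-- ===== VERDICT (by name: the statement is the Claim_ definition above) =====
theorem filter_low_competition_spec : Claim_equal_filter_low_competition := by
  intro opps _
  unfold Spec_filter_low_competition filter_low_competition filter_low_competition_alt
  rw [PySem.List.foldl_append_if_eq_filter, List.nil_append]
  show PySem.List.slice (PySem.List.sorted (opps.filter flcPred) flcKey) none (some 34) = _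
  rw [PySem.List.slice_to _ (b := 34) (by norm_num), PySem.List.sorted_eq_foldl_insertBy,
    PySem.List.foldl_if_eq_foldl_filter]
  have h := foldl_insertBy_take (fun a b => decide (flcKey a < flcKey b)) 34
    (opps.filter flcPred) []
  simp only [List.take_nil] at h
  rw [show Int.toNat 34 = 34 from rfl]
  exact h.symm
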